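-- pv_equiv track=rewrite | github.com/NonGP33M/ObjectOrientedDataStructures_Labs | week_7/Sorting/Lab2_AbsoluteNumberSort.py | findIndexOfMaxPositive
-- ===== SOURCE A (Python) =====
-- def findIndexOfMaxPositive(lists):
--     index = None
--     for i in range(len(lists)):
--         if index == None and lists[i] >= 0:
--             index = i
--         elif index != None and lists[i] >lists[index]:
--             index = i
--     return index
-- ===== SOURCE B (Python) =====
-- def findIndexOfMaxPositive(lists):
--     positives = [i for i, v in enumerate(lists) if v >= 0]
--     if not positives:
--         return None
--     return max(positives, key=lambda i: lists[i])
-- ===== Notes on version B (the rewrite author's own statement) =====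
-- stated objective: simpler
-- what changed: Replaced A's fused single-pass conditional scan with Option state by a two-pass filter-then-reduce: collect the indices of non-negative elements, then take max with key, relying on max's first-occurrence tie rule.
import Mathlib
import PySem

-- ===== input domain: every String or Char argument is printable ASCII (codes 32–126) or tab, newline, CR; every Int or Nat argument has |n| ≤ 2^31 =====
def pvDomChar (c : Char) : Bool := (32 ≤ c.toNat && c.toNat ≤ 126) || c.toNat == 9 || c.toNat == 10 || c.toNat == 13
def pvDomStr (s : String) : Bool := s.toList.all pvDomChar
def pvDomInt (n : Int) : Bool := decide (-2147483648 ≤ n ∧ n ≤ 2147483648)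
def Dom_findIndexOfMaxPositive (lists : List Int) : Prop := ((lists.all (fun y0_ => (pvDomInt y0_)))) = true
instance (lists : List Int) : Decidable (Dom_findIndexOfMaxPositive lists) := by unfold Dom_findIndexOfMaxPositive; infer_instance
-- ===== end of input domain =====

-- B replaces A's fused single-pass Option-state scan with a two-pass filter-then-reduce (simpler decomposition, same O(n) cost).

-- ===== PORT A =====
-- every index i comes from range(len(lists)) and the stored index j is a previous i, so lists[i]/lists[j] are in range; pyGetD is exact there
def findIndexOfMaxPositive (lists : List Int) : Option Int :=
  (PySem.List.pyRange 0 lists.length 1).foldl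
    (fun index i =>
      match index with
      | none => if 0 ≤ PySem.List.pyGetD lists i 0 then some i else none
      | some j => if PySem.List.pyGetD lists j 0 < PySem.List.pyGetD lists i 0 then some i else some j)
    none

-- ===== PORT B =====
def findIndexOfMaxPositive_alt (lists : List Int) : Option Int :=
  let positives := ((PySem.List.enumerate lists).filter (fun p => 0 ≤ p.2)).map Prod.fst
  if positives.isEmpty then none
  else PySem.List.max? positives (fun i => PySem.List.pyGetD lists i 0)

-- ===== PRECONDITION & SPEC =====
def Spec_findIndexOfMaxPositive (lists : List Int) (out : Option Int) : Prop := out = findIndexOfMaxPositive_alt lists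
instance (lists : List Int) (out : Option Int) : Decidable (Spec_findIndexOfMaxPositive lists out) := by unfold Spec_findIndexOfMaxPositive; infer_instance

-- ===== CLAIM (what is proved, stated in full; the proofs are below) =====
def Claim_equal_findIndexOfMaxPositive : Prop := ∀ (lists : List Int), Dom_findIndexOfMaxPositive lists → Spec_findIndexOfMaxPositive lists (findIndexOfMaxPositive lists)

-- ===== LEMMAS AND PROOFS =====

-- A's step skips an index i with lists[i] < 0 whenever the state satisfies the invariant
-- (stored index has a non-negative value), so A's fold over all indices equals max?'s fold
-- over the filtered ones.
theorem pv_fold_filter (lists : List Int) :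
    ∀ (idxs : List Int) (s : Option Int),
      (∀ j, s = some j → 0 ≤ PySem.List.pyGetD lists j 0) →
      idxs.foldl
        (fun index i =>
          match index with
          | none => if 0 ≤ PySem.List.pyGetD lists i 0 then some i else none
          | some j => if PySem.List.pyGetD lists j 0 < PySem.List.pyGetD lists i 0 then some i else some j)
        s
      = (idxs.filter (fun i => decide (0 ≤ PySem.List.pyGetD lists i 0))).foldl
        (fun acc x =>
          match acc with
          | none => some x
          | some m => if PySem.List.pyGetD lists m 0 < PySem.List.pyGetD lists x 0 then some x else some m)
        s := by
  intro idxs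
  induction idxs with
  | nil => intro s _; rfl
  | cons i t ih =>
    intro s hs
    by_cases hi : 0 ≤ PySem.List.pyGetD lists i 0
    · simp only [List.foldl_cons, List.filter_cons, hi, decide_true, if_true]
      cases s with
      | none => exact ih (some i) (by intro j hj; cases hj; exact hi)
      | some j =>
        by_cases hlt : PySem.List.pyGetD lists j 0 < PySem.List.pyGetD lists i 0
        · simp only [hlt, if_true]
          exact ih (some i) (by intro k hk; cases hk; exact hi)
        · simp only [hlt, if_false]
          exact ih (some j) (by intro k hk; cases hk; exact hs j rfl)
    · simp only [List.foldl_cons, List.filter_cons, hi, decide_false, if_false]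
      cases s with
      | none => exact ih none (by intro j hj; cases hj)
      | some j =>
        have : ¬ PySem.List.pyGetD lists j 0 < PySem.List.pyGetD lists i 0 := by
          have := hs j rfl; omega
        simp only [this, if_false]
        exact ih (some j) hs

-- the filtered index range IS the list of first components of the filtered enumeration
theorem pv_range_filter_eq_enum (lists : List Int) :
    ∀ (ys : List Int) (a : Int),
      (∀ k : Nat, PySem.List.pyGetD lists (a + k) 0 = ys.getD k 0) →
      (PySem.List.pyRange a (a + ys.length) 1).filter
          (fun i => decide (0 ≤ PySem.List.pyGetD lists i 0))
        = ((PySem.List.enumerate ys a).filter (fun p => decide (0 ≤ p.2))).map Prod.fst := by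
  intro ys
  induction ys with
  | nil =>
    intro a _
    rw [PySem.List.pyRange_one_eq_nil (by simp)]
    simp [PySem.List.enumerate]
  | cons y t ih =>
    intro a h
    have h0 : PySem.List.pyGetD lists a 0 = y := by
      have := h 0; simpa using this
    have hcons : PySem.List.pyRange a (a + ((y :: t).length : Int)) 1
        = a :: PySem.List.pyRange (a + 1) (a + ((y :: t).length : Int)) 1 := by
      apply PySem.List.pyRange_one_cons
      simp only [List.length_cons]
      push_cast
      omega
    have hend : a + (((y :: t).length : Nat) : Int) = (a + 1) + (t.length : Int) := by
      simp only [List.length_cons]; push_cast; omega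
    have ht : ∀ k : Nat, PySem.List.pyGetD lists ((a + 1) + k) 0 = t.getD k 0 := by
      intro k
      have := h (k + 1)
      simpa [add_assoc, add_comm, add_left_comm] using this
    rw [hcons, hend]
    simp only [PySem.List.enumerate, List.filter_cons, List.filter_cons, h0]
    by_cases hy : 0 ≤ y
    · simp [hy, ih (a + 1) ht]
    · simp [hy, ih (a + 1) ht]

-- the guard 'if positives is empty then None' coincides with max?'s fold from none
theorem pv_if_empty (lists : List Int) (l : List Int) :
    l.foldl
      (fun acc x =>
        match acc with
        | none => some x
        | some m => if PySem.List.pyGetD lists m 0 < PySem.List.pyGetD lists x 0 then some x else some m)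
      none
    = (if l.isEmpty then none else PySem.List.max? l (fun i => PySem.List.pyGetD lists i 0)) := by
  cases l with
  | nil => rfl
  | cons x xs =>
    simp only [List.isEmpty_cons, Bool.false_eq_true, if_false, PySem.List.max?, List.foldl_cons]
    apply List.foldl_ext
    intro acc y _
    cases acc with
    | none => rfl
    | some m => by_cases h : PySem.List.pyGetD lists m 0 < PySem.List.pyGetD lists y 0 <;> simp [h]

-- ===== VERDICT (by name: the statement is the Claim_ definition above) =====
theorem findIndexOfMaxPositive_spec : Claim_equal_findIndexOfMaxPositive := by
  intro lists _
  unfold Spec_findIndexOfMaxPositive findIndexOfMaxPositive findIndexOfMaxPositive_alt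
  have hk : ∀ k : Nat, PySem.List.pyGetD lists ((0 : Int) + k) 0 = lists.getD k 0 := by
    intro k; simp
  have henum := pv_range_filter_eq_enum lists lists 0 hk
  rw [zero_add] at henum
  rw [pv_fold_filter lists _ none (by intro j hj; cases hj), henum,
    pv_if_empty lists (((PySem.List.enumerate lists).filter (fun p => decide (0 ≤ p.2))).map Prod.fst)]
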